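-- pv_equiv track=rewrite | github.com/cordovez/fretmaster_app | controllers/fretboards.py | fretboard_matrix
-- ===== SOURCE A (Python) =====
-- def fretboard_matrix(notes: list[object]):
--     fret = 1
--     fret_group = []
--     fretboard = []
--
--     while len(fretboard) < 12:
--         for note in notes:
--             if note["fret"] == fret:
--                 fret_group.append(note)
--         fretboard.append(fret_group)
--         fret_group = []
--         fret += 1
--
--     return fretboard
-- ===== SOURCE B (Python) =====
-- def fretboard_matrix(notes: list[object]):
--     buckets = {}
--     for note in notes:
--         buckets.setdefault(note["fret"], []).append(note)
--     return [buckets.get(f, []) for f in range(1, 13)]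
-- ===== Notes on version B (the rewrite author's own statement) =====
-- stated objective: faster
-- what changed: Replaces the 12 repeated scans of notes (one per fret) by a single pass that groups notes into a dict keyed by their fret value, then reads off buckets 1..12.
import Mathlib
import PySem

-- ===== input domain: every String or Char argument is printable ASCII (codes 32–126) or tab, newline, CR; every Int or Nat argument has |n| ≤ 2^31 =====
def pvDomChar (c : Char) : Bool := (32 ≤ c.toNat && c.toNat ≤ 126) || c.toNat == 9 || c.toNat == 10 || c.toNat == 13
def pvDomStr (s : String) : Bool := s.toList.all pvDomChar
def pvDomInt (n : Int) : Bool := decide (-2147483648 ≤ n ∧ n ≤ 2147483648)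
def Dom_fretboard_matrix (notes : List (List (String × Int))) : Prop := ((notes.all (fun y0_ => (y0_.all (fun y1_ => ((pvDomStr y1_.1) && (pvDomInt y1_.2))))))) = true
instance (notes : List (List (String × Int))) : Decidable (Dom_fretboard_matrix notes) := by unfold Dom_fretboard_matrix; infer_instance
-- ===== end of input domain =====

-- B replaces A's 12 repeated scans of notes by one grouping pass into a dict keyed by fret, then reads buckets 1..12.


-- ===== PORT A =====
-- note["fret"]: first-match lookup in the note's association list (none = KeyError, excluded by Pre_)
def fretKey (note : List (String × Int)) : Option Int := (PySem.Dict.mk note).get? "fret"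

-- the inner 'for note in notes: if note["fret"] == fret: fret_group.append(note)'
def fbInner (notes : List (List (String × Int))) (fret : Int) : List (List (String × Int)) :=
  notes.foldl (fun g note => if fretKey note == some fret then g ++ [note] else g) []

-- the 'while len(fretboard) < 12' loop; fuel = 12 - len(fretboard), exact since each pass appends one bucket
def fbLoop (notes : List (List (String × Int))) (fret : Int)
    (fretboard : List (List (List (String × Int)))) : Nat → List (List (List (String × Int)))
  | 0 => fretboard
  | r + 1 => fbLoop notes (fret + 1) (fretboard ++ [fbInner notes fret]) r

def fretboard_matrix (notes : List (List (String × Int))) : List (List (List (String × Int))) :=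
  fbLoop notes 1 [] 12

-- ===== PORT B =====
-- buckets.setdefault(note["fret"], []).append(note)  =  modify at the (Option-valued) looked-up key
def fbBuckets (notes : List (List (String × Int))) : PySem.Dict (Option Int) (List (List (String × Int))) :=
  notes.foldl (fun d note => d.modify (fretKey note) [] (· ++ [note])) PySem.Dict.empty

def fretboard_matrix_alt (notes : List (List (String × Int))) : List (List (List (String × Int))) :=
  (PySem.List.pyRange 1 13 1).map (fun f => (fbBuckets notes).getD (some f) [])

-- ===== PRECONDITION & SPEC =====
-- Pre_ excludes exactly the inputs on which Python A raises KeyError: a note without a "fret" key.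
def Pre_fretboard_matrix (notes : List (List (String × Int))) : Prop :=
  ∀ note ∈ notes, (fretKey note).isSome = true
instance (notes : List (List (String × Int))) : Decidable (Pre_fretboard_matrix notes) := by
  unfold Pre_fretboard_matrix; infer_instance

def pvWitness_fretboard_matrix : (List (List (String × Int))) :=
  [[("fret", 3)], [("fret", 3), ("name", 7)], [("fret", 14)]]

def Spec_fretboard_matrix (notes : List (List (String × Int))) (out : List (List (List (String × Int)))) : Prop := out = fretboard_matrix_alt notes
instance (notes : List (List (String × Int))) (out : List (List (List (String × Int)))) : Decidable (Spec_fretboard_matrix notes out) := by unfold Spec_fretboard_matrix; infer_instance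

-- ===== CLAIM (what is proved, stated in full; the proofs are below) =====
def Claim_equal_fretboard_matrix : Prop := ∀ (notes : List (List (String × Int))), Dom_fretboard_matrix notes → Pre_fretboard_matrix notes → Spec_fretboard_matrix notes (fretboard_matrix notes)

-- ===== LEMMAS AND PROOFS =====

-- A's inner accumulation loop is a filter
theorem fbInner_eq_filter (notes : List (List (String × Int))) (fret : Int) :
    fbInner notes fret = notes.filter (fun note => fretKey note == some fret) := by
  unfold fbInner
  rw [PySem.List.foldl_append_if]
  simp

-- A's while loop appends the buckets for the next r frets
theorem fbLoop_eq (notes : List (List (String × Int))) (r : Nat) :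
    ∀ (fret : Int) (fb : List (List (List (String × Int)))),
      fbLoop notes fret fb r = fb ++ (List.range r).map (fun i : Nat => fbInner notes (fret + (i : Int))) := by
  induction r with
  | zero => intro fret fb; simp [fbLoop]
  | succ r ih =>
    intro fret fb
    rw [fbLoop, ih, List.range_succ_eq_map, List.map_cons, List.map_map]
    have h : ((fun i : Nat => fbInner notes (fret + (i : Int))) ∘ Nat.succ)
        = fun i : Nat => fbInner notes (fret + 1 + (i : Int)) := by
      funext i; simp only [Function.comp_apply]; congr 1; push_cast; ring
    rw [h]
    simp

-- B's bucket at key (some f) is exactly the notes whose fret is f, in order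
theorem getD_bucket_fold (l : List (List (String × Int)))
    (d : PySem.Dict (Option Int) (List (List (String × Int)))) (f : Int) :
    (l.foldl (fun d note => d.modify (fretKey note) [] (· ++ [note])) d).getD (some f) []
      = d.getD (some f) [] ++ l.filter (fun note => fretKey note == some f) := by
  induction l generalizing d with
  | nil => simp
  | cons a l ih =>
    rw [List.foldl_cons, ih, PySem.Dict.getD_modify, List.filter_cons]
    by_cases h : fretKey a = some f
    · simp [h]
    · rw [if_neg (fun hh => h hh.symm)]
      simp [h]

theorem fbBuckets_getD (notes : List (List (String × Int))) (f : Int) :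
    (fbBuckets notes).getD (some f) [] = notes.filter (fun note => fretKey note == some f) := by
  unfold fbBuckets
  rw [getD_bucket_fold]
  simp

-- ===== VERDICT (by name: the statement is the Claim_ definition above) =====
theorem fretboard_matrix_spec : Claim_equal_fretboard_matrix := by
  intro notes _ _
  unfold Spec_fretboard_matrix fretboard_matrix fretboard_matrix_alt
  rw [fbLoop_eq, PySem.List.pyRange_one]
  simp [List.map_map, Function.comp_def, fbBuckets_getD, fbInner_eq_filter]
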